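-- pv_equiv track=rewrite | github.com/celiksesefe/PlakaTespitSunucuApi | app/ocr_enhancement.py | apply_diplomatic_corrections
-- ===== SOURCE A (Python) =====
-- def apply_diplomatic_corrections(text, analysis):
--     """
--     Apply corrections for diplomatic format plates
--     """
--     groups = analysis['groups']
--     if len(groups) >= 2:
--         letters, numbers = groups[:2]
--
--         # Conservative corrections for diplomatic plates
--         fixed_letters = letters
--         for number, letter in {'0': 'O', '1': 'I'}.items():
--             fixed_letters = fixed_letters.replace(number, letter)
--
--         fixed_numbers = numbers
--         for letter, number in {'O': '0', 'I': '1', 'S': '5'}.items():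
--             fixed_numbers = fixed_numbers.replace(letter, number)
--
--         result = fixed_letters + fixed_numbers
--         if len(groups) > 2 and groups[2]:  # Trailing letter
--             result += groups[2]
--
--         return result
--
--     return text
-- ===== SOURCE B (Python) =====
-- def apply_diplomatic_corrections(text, analysis):
--     """
--     Apply corrections for diplomatic format plates.
--     Single fused pass: both groups are scanned once as one enumerated stream,
--     with a position-keyed correction table deciding each character, instead of
--     staged whole-string replace passes per group.
--     """
--     groups = analysis['groups']
--     if len(groups) >= 2:
--         letters, numbers = groups[:2]
--         fix = {(True, '0'): 'O', (True, '1'): 'I',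
--                (False, 'O'): '0', (False, 'I'): '1', (False, 'S'): '5'}
--         k = len(letters)
--         out = []
--         for i, c in enumerate(letters + numbers):
--             out.append(fix.get((i < k, c), c))
--         result = ''.join(out)
--         if len(groups) > 2 and groups[2]:  # Trailing letter
--             result += groups[2]
--         return result
--     return text
-- ===== Notes on version B (the rewrite author's own statement) =====
-- stated objective: alternative
-- what changed: Replaces A's five staged whole-string .replace passes over two separate groups with one fused enumerated scan of letters+numbers, where a single dict keyed by (position-in-letters?, char) decides each output character.
import Mathlib
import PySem

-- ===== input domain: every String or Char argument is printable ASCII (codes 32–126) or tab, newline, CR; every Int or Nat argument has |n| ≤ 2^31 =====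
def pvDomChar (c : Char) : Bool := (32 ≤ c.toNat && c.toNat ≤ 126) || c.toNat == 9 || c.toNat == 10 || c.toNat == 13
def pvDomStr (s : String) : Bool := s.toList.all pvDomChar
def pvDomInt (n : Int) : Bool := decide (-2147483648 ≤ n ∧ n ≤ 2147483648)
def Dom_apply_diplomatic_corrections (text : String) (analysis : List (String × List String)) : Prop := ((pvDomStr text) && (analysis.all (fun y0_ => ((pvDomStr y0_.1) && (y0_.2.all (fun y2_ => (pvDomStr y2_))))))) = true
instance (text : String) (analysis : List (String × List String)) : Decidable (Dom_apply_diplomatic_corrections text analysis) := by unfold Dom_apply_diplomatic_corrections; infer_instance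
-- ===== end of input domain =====

-- B replaces A's staged per-group whole-string replace passes with one fused enumerated
-- scan of letters+numbers driven by a single (position,char)-keyed correction dict (alternative).

-- ===== PORT A =====
def apply_diplomatic_corrections (text : String) (analysis : List (String × List String)) : String :=
  match (PySem.Dict.mk analysis).get? "groups" with
  | none => text  -- KeyError in Python; excluded by Pre_
  | some groups =>
    if 2 ≤ groups.length then
      let letters := groups.getD 0 ""
      let numbers := groups.getD 1 ""
      let fixed_letters := PySem.Str.replace (PySem.Str.replace letters "0" "O") "1" "I"
      let fixed_numbers := PySem.Str.replace (PySem.Str.replace (PySem.Str.replace numbers "O" "0") "I" "1") "S" "5"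
      let result := fixed_letters ++ fixed_numbers
      if 2 < groups.length ∧ groups.getD 2 "" ≠ "" then result ++ groups.getD 2 "" else result
    else text

-- ===== PORT B =====
-- the dict literal 'fix' of Source B
def pvFix : PySem.Dict (Bool × Char) Char :=
  PySem.Dict.mk [((true, '0'), 'O'), ((true, '1'), 'I'),
                 ((false, 'O'), '0'), ((false, 'I'), '1'), ((false, 'S'), '5')]

def apply_diplomatic_corrections_alt (text : String) (analysis : List (String × List String)) : String :=
  match (PySem.Dict.mk analysis).get? "groups" with
  | none => text  -- KeyError in Python; excluded by Pre_
  | some groups =>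
    if 2 ≤ groups.length then
      let letters := groups.getD 0 ""
      let numbers := groups.getD 1 ""
      let k : Int := letters.toList.length
      let out := (PySem.List.enumerate ((letters ++ numbers).toList)).foldl
        (fun acc ic => acc ++ [pvFix.getD (decide (ic.1 < k), ic.2) ic.2]) []
      let result := String.ofList out
      if 2 < groups.length ∧ groups.getD 2 "" ≠ "" then result ++ groups.getD 2 "" else result
    else text

-- ===== PRECONDITION & SPEC =====
-- Pre_ excludes exactly the inputs whose analysis has no 'groups' key: Python A raises KeyError there (B does too).
def Pre_apply_diplomatic_corrections (text : String) (analysis : List (String × List String)) : Prop :=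
  ((PySem.Dict.mk analysis).get? "groups").isSome = true
instance (text : String) (analysis : List (String × List String)) : Decidable (Pre_apply_diplomatic_corrections text analysis) := by unfold Pre_apply_diplomatic_corrections; infer_instance
def pvWitness_apply_diplomatic_corrections : String × (List (String × List String)) :=
  ("AB123", [("groups", ["0I", "S1", "C"])])
def Spec_apply_diplomatic_corrections (text : String) (analysis : List (String × List String)) (out : String) : Prop := out = apply_diplomatic_corrections_alt text analysis
instance (text : String) (analysis : List (String × List String)) (out : String) : Decidable (Spec_apply_diplomatic_corrections text analysis out) := by unfold Spec_apply_diplomatic_corrections; infer_instance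

-- ===== CLAIM (what is proved, stated in full; the proofs are below) =====
def Claim_equal_apply_diplomatic_corrections : Prop := ∀ (text : String) (analysis : List (String × List String)), Dom_apply_diplomatic_corrections text analysis → Pre_apply_diplomatic_corrections text analysis → Spec_apply_diplomatic_corrections text analysis (apply_diplomatic_corrections text analysis)

-- ===== LEMMAS AND PROOFS =====

-- the per-character effect of A's two letter-group replaces / three number-group replaces
def pvToLetter (c : Char) : Char := if c = '0' then 'O' else if c = '1' then 'I' else c
def pvToNumber (c : Char) : Char := if c = 'O' then '0' else if c = 'I' then '1' else if c = 'S' then '5' else c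

-- replace.go with a single-char pattern is a map, given enough fuel
theorem pvGoSingle (o n : Char) : ∀ (l : List Char) (acc : List Char) (fuel : Nat), l.length ≤ fuel →
    PySem.Chars.replace.go [o] [n] fuel l acc = acc.reverse ++ l.map (fun c => if c = o then n else c) := by
  intro l
  induction l with
  | nil => intro acc fuel _; cases fuel <;> simp [PySem.Chars.replace.go]
  | cons c t ih =>
    intro acc fuel hf
    cases fuel with
    | zero => simp at hf
    | succ fuel =>
      simp only [List.length_cons, Nat.add_le_add_iff_right] at hf
      rw [PySem.Chars.replace.go]
      by_cases h : c = o
      · subst h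
        simp [List.isPrefixOf, ih (n :: acc) fuel hf]
      · simp [List.isPrefixOf, Ne.symm h, ih (c :: acc) fuel hf, h]

-- single-char replace is a map over the characters
theorem pvReplaceSingle (s : List Char) (o n : Char) :
    PySem.Chars.replace s [o] [n] = s.map (fun c => if c = o then n else c) := by
  simpa [PySem.Chars.replace] using pvGoSingle o n s [] s.length le_rfl

-- A's two sequential replaces on the letter group are the character map pvToLetter
theorem pvFixedLetters (s : String) :
    PySem.Str.replace (PySem.Str.replace s "0" "O") "1" "I" = String.ofList (s.toList.map pvToLetter) := by
  unfold PySem.Str.replace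
  rw [← String.toList_inj]
  simp only [String.toList_ofList, show ("0" : String).toList = ['0'] from rfl,
    show ("O" : String).toList = ['O'] from rfl, show ("1" : String).toList = ['1'] from rfl,
    show ("I" : String).toList = ['I'] from rfl]
  rw [pvReplaceSingle, pvReplaceSingle, List.map_map]
  apply List.map_congr_left
  intro c _
  by_cases h0 : c = '0' <;> by_cases h1 : c = '1' <;> simp_all [pvToLetter]

-- A's three sequential replaces on the number group are the character map pvToNumber
theorem pvFixedNumbers (s : String) :
    PySem.Str.replace (PySem.Str.replace (PySem.Str.replace s "O" "0") "I" "1") "S" "5"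
      = String.ofList (s.toList.map pvToNumber) := by
  unfold PySem.Str.replace
  rw [← String.toList_inj]
  simp only [String.toList_ofList, show ("O" : String).toList = ['O'] from rfl,
    show ("0" : String).toList = ['0'] from rfl, show ("I" : String).toList = ['I'] from rfl,
    show ("1" : String).toList = ['1'] from rfl, show ("S" : String).toList = ['S'] from rfl,
    show ("5" : String).toList = ['5'] from rfl]
  rw [pvReplaceSingle, pvReplaceSingle, pvReplaceSingle, List.map_map, List.map_map]
  apply List.map_congr_left
  intro c _
  by_cases hO : c = 'O' <;> by_cases hI : c = 'I' <;> by_cases hS : c = 'S' <;>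
    simp_all [pvToNumber]

-- the fused dict, looked up in the letter region, is pvToLetter
theorem pvFixTrue (c : Char) : pvFix.getD (true, c) c = pvToLetter c := by
  by_cases h0 : c = '0'
  · subst h0; rfl
  by_cases h1 : c = '1'
  · subst h1; rfl
  simp [pvFix, pvToLetter, PySem.Dict.getD_eq_get?_getD, PySem.Dict.get?, Ne.symm h0, Ne.symm h1, h0, h1]

-- the fused dict, looked up in the number region, is pvToNumber
theorem pvFixFalse (c : Char) : pvFix.getD (false, c) c = pvToNumber c := by
  by_cases hO : c = 'O'
  · subst hO; rfl
  by_cases hI : c = 'I'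
  · subst hI; rfl
  by_cases hS : c = 'S'
  · subst hS; rfl
  simp [pvFix, pvToNumber, PySem.Dict.getD_eq_get?_getD, PySem.Dict.get?, Ne.symm hO, Ne.symm hI, Ne.symm hS, hO, hI, hS]

-- a map over an enumeration whose function only looks at indices through a region test
theorem pvMapEnum {l : List Char} {s : Int} (f : Int × Char → Char) (m : Char → Char)
    (h : ∀ p ∈ PySem.List.enumerate l s, f p = m p.2) :
    (PySem.List.enumerate l s).map f = l.map m := by
  rw [List.map_congr_left h]
  rw [show (fun p : Int × Char => m p.2) = m ∘ (·.2) from rfl, ← List.map_map,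
    PySem.List.map_snd_enumerate]

-- B's fused foldl equals A's per-group character maps concatenated
theorem pvFusedPass (ls ns : List Char) :
    (PySem.List.enumerate (ls ++ ns)).foldl
        (fun acc ic => acc ++ [pvFix.getD (decide (ic.1 < (ls.length : Int)), ic.2) ic.2]) []
      = ls.map pvToLetter ++ ns.map pvToNumber := by
  rw [PySem.List.foldl_append_singleton_eq_map, PySem.List.enumerate_append]
  simp only [List.map_append, List.nil_append]
  congr 1
  · apply pvMapEnum
    intro p hp
    rw [PySem.List.mem_enumerate_iff] at hp
    obtain ⟨j, hj, rfl⟩ := hp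
    have : decide ((0 + (j : Int)) < (ls.length : Int)) = true := by
      simp only [decide_eq_true_eq, zero_add]; exact_mod_cast hj
    rw [this, pvFixTrue]
  · apply pvMapEnum
    intro p hp
    rw [PySem.List.mem_enumerate_iff] at hp
    obtain ⟨j, hj, rfl⟩ := hp
    have : decide ((0 + (ls.length : Nat) + (j : Int)) < (ls.length : Int)) = false := by
      simp only [decide_eq_false_iff_not, not_lt]
      omega
    rw [this, pvFixFalse]

-- ===== VERDICT (by name: the statement is the Claim_ definition above) =====
theorem apply_diplomatic_corrections_spec : Claim_equal_apply_diplomatic_corrections := by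
  intro text analysis _ _
  unfold Spec_apply_diplomatic_corrections apply_diplomatic_corrections apply_diplomatic_corrections_alt
  cases (PySem.Dict.mk analysis).get? "groups" with
  | none => rfl
  | some groups =>
    simp only [pvFixedLetters, pvFixedNumbers, String.toList_append, pvFusedPass]
    split
    · split <;> rw [← String.toList_inj] <;> simp
    · rfl
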